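-- pv_equiv track=rewrite | github.com/sercinci/sursk.it | scripts/build_it_localization.py | split_template_args
-- ===== SOURCE A (Python) =====
-- def split_template_args(text: str) -> list[str]:
--     args: list[str] = []
--     buffer: list[str] = []
--     curly_depth = 0
--     square_depth = 0
--     index = 0
--     while index < len(text):
--         char = text[index]
--         nxt = text[index + 1] if index + 1 < len(text) else ""
--         if char == "{" and nxt == "{":
--             curly_depth += 1
--             buffer.append(char)
--             index += 1
--             buffer.append(nxt)
--         elif char == "}" and nxt == "}":
--             curly_depth = max(0, curly_depth - 1)
--             buffer.append(char)
--             index += 1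
--             buffer.append(nxt)
--         elif char == "[" and nxt == "[":
--             square_depth += 1
--             buffer.append(char)
--             index += 1
--             buffer.append(nxt)
--         elif char == "]" and nxt == "]":
--             square_depth = max(0, square_depth - 1)
--             buffer.append(char)
--             index += 1
--             buffer.append(nxt)
--         elif char == "|" and curly_depth == 0 and square_depth == 0:
--             args.append("".join(buffer).strip())
--             buffer = []
--         else:
--             buffer.append(char)
--         index += 1
--     if buffer:
--         args.append("".join(buffer).strip())
--     return args
-- ===== SOURCE B (Python) =====
-- def split_template_args(text: str) -> list[str]:
--     n = len(text)
--     pipes: list[int] = []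
--     curly = square = 0
--     i = 0
--     while i < n:
--         ch = text[i]
--         if ch in "{[" and i + 1 < n and text[i + 1] == ch:
--             if ch == "{":
--                 curly += 1
--             else:
--                 square += 1
--             i += 2
--             continue
--         if ch in "}]" and i + 1 < n and text[i + 1] == ch:
--             if ch == "}":
--                 curly = max(0, curly - 1)
--             else:
--                 square = max(0, square - 1)
--             i += 2
--             continue
--         if ch == "|" and curly == 0 and square == 0:
--             pipes.append(i)
--         i += 1
--     parts: list[str] = []
--     start = 0
--     for p in pipes:
--         parts.append(text[start:p].strip())
--         start = p + 1
--     if start < n: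
--         parts.append(text[start:].strip())
--     return parts
-- ===== Notes on version B (the rewrite author's own statement) =====
-- stated objective: faster
-- what changed: B records the indices of top-level pipes in one depth-tracking scan and then builds the result by slicing the original string between consecutive boundaries, instead of A's per-character buffer appends that are joined and flushed at each pipe.
import Mathlib
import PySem

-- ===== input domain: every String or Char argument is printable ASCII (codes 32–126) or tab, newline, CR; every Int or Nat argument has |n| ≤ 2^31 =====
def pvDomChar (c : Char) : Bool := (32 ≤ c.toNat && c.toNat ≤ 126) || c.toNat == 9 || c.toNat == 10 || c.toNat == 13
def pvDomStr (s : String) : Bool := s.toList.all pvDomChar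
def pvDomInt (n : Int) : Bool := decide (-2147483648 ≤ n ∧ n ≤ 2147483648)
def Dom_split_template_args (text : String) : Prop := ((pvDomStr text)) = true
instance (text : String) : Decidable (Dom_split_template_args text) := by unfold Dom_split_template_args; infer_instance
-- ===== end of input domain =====

-- B replaces A's character buffer by recording top-level pipe indices and slicing; same result, proved equal.

-- ===== PORT A =====
-- the while loop of A: state (args, buffer, curly_depth, square_depth), index i.
-- Nat subtraction 'cd - 1' is exactly Python's max(0, cd - 1) on Nat depths.
def pvLoopA (cs : List Char) (i : Nat) (args : List String) (buf : List Char)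
    (cd sd : Nat) : List String :=
  if h : i < cs.length then
    let c := cs[i]
    let nxt : Option Char := if h2 : i + 1 < cs.length then some cs[i+1] else none
    if c = '{' ∧ nxt = some '{' then
      pvLoopA cs (i + 2) args (buf ++ [c, '{']) (cd + 1) sd
    else if c = '}' ∧ nxt = some '}' then
      pvLoopA cs (i + 2) args (buf ++ [c, '}']) (cd - 1) sd
    else if c = '[' ∧ nxt = some '[' then
      pvLoopA cs (i + 2) args (buf ++ [c, '[']) cd (sd + 1)
    else if c = ']' ∧ nxt = some ']' then
      pvLoopA cs (i + 2) args (buf ++ [c, ']']) cd (sd - 1)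
    else if c = '|' ∧ cd = 0 ∧ sd = 0 then
      pvLoopA cs (i + 1) (args ++ [String.ofList (PySem.Chars.strip buf)]) [] cd sd
    else
      pvLoopA cs (i + 1) args (buf ++ [c]) cd sd
  else
    if buf ≠ [] then args ++ [String.ofList (PySem.Chars.strip buf)] else args
termination_by cs.length - i
decreasing_by all_goals omega

def split_template_args (text : String) : List String :=
  pvLoopA text.toList 0 [] [] 0 0

-- ===== PORT B =====
-- first pass of B: collect the indices of pipes at depth (0,0)
def pvScanB (cs : List Char) (i : Nat) (cd sd : Nat) : List Nat :=
  if h : i < cs.length then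
    let c := cs[i]
    if (c = '{' ∨ c = '[') ∧ (i + 1 < cs.length ∧ cs[i+1]? = some c) then
      if c = '{' then pvScanB cs (i + 2) (cd + 1) sd else pvScanB cs (i + 2) cd (sd + 1)
    else if (c = '}' ∨ c = ']') ∧ (i + 1 < cs.length ∧ cs[i+1]? = some c) then
      -- max(0, d - 1) is Nat subtraction
      if c = '}' then pvScanB cs (i + 2) (cd - 1) sd else pvScanB cs (i + 2) cd (sd - 1)
    else if c = '|' ∧ cd = 0 ∧ sd = 0 then
      i :: pvScanB cs (i + 1) cd sd
    else
      pvScanB cs (i + 1) cd sd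
  else []
termination_by cs.length - i
decreasing_by all_goals omega

-- second pass of B: slice between consecutive boundaries; text[start:p] = (drop start).take (p - start)
def pvPartsB (cs : List Char) (start : Nat) : List Nat → List String
  | [] => if start < cs.length then [String.ofList (PySem.Chars.strip (cs.drop start))] else []
  | p :: ps => String.ofList (PySem.Chars.strip ((cs.drop start).take (p - start))) :: pvPartsB cs (p + 1) ps

def split_template_args_alt (text : String) : List String :=
  pvPartsB text.toList 0 (pvScanB text.toList 0 0 0)

-- ===== PRECONDITION & SPEC =====
def Spec_split_template_args (text : String) (out : List String) : Prop := out = split_template_args_alt text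
instance (text : String) (out : List String) : Decidable (Spec_split_template_args text out) := by unfold Spec_split_template_args; infer_instance

-- ===== CLAIM (what is proved, stated in full; the proofs are below) =====
def Claim_equal_split_template_args : Prop := ∀ (text : String), Dom_split_template_args text → Spec_split_template_args text (split_template_args text)

-- ===== LEMMAS AND PROOFS =====

-- the segment of cs between boundary 'start' and position 'i' (A's buffer contents)
def pvSeg (cs : List Char) (start i : Nat) : List Char := (cs.drop start).take (i - start)

theorem pvSeg_self (cs : List Char) (start : Nat) : pvSeg cs start start = [] := by
  simp [pvSeg]

theorem pvSeg_snoc (cs : List Char) (start i : Nat) (hs : start ≤ i) (hi : i < cs.length) :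
    pvSeg cs start (i + 1) = pvSeg cs start i ++ [cs[i]] := by
  unfold pvSeg
  have h1 : i + 1 - start = (i - start) + 1 := by omega
  rw [h1, List.take_add_one]
  have h2 : (cs.drop start)[i - start]? = some cs[i] := by
    rw [List.getElem?_drop]
    have h3 : start + (i - start) = i := by omega
    rw [h3, List.getElem?_eq_getElem hi]
  rw [h2]
  rfl

theorem pvSeg_ge (cs : List Char) (start i : Nat) (hi : cs.length ≤ i) :
    pvSeg cs start i = cs.drop start := by
  apply List.take_of_length_le
  simp; omega

-- one-step equations for port A's loop
theorem pvA_oc {cs : List Char} {i : Nat} (args : List String) (buf : List Char) (cd sd : Nat)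
    (hi : i < cs.length) (h2 : i + 1 < cs.length) (hc : cs[i] = '{') (hn : cs[i+1] = '{') :
    pvLoopA cs i args buf cd sd = pvLoopA cs (i+2) args (buf ++ ['{', '{']) (cd+1) sd := by
  rw [pvLoopA]; simp [hi, h2, hc, hn]

theorem pvA_cc {cs : List Char} {i : Nat} (args : List String) (buf : List Char) (cd sd : Nat)
    (hi : i < cs.length) (h2 : i + 1 < cs.length) (hc : cs[i] = '}') (hn : cs[i+1] = '}') :
    pvLoopA cs i args buf cd sd = pvLoopA cs (i+2) args (buf ++ ['}', '}']) (cd-1) sd := by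
  rw [pvLoopA]; simp [hi, h2, hc, hn]

theorem pvA_os {cs : List Char} {i : Nat} (args : List String) (buf : List Char) (cd sd : Nat)
    (hi : i < cs.length) (h2 : i + 1 < cs.length) (hc : cs[i] = '[') (hn : cs[i+1] = '[') :
    pvLoopA cs i args buf cd sd = pvLoopA cs (i+2) args (buf ++ ['[', '[']) cd (sd+1) := by
  rw [pvLoopA]; simp [hi, h2, hc, hn]

theorem pvA_cs {cs : List Char} {i : Nat} (args : List String) (buf : List Char) (cd sd : Nat)
    (hi : i < cs.length) (h2 : i + 1 < cs.length) (hc : cs[i] = ']') (hn : cs[i+1] = ']') :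
    pvLoopA cs i args buf cd sd = pvLoopA cs (i+2) args (buf ++ [']', ']']) cd (sd-1) := by
  rw [pvLoopA]; simp [hi, h2, hc, hn]

theorem pvA_pipe {cs : List Char} {i : Nat} (args : List String) (buf : List Char) (cd sd : Nat)
    (hi : i < cs.length) (hc : cs[i] = '|') (hcd : cd = 0) (hsd : sd = 0) :
    pvLoopA cs i args buf cd sd
      = pvLoopA cs (i+1) (args ++ [String.ofList (PySem.Chars.strip buf)]) [] cd sd := by
  rw [pvLoopA]; simp [hi, hc, hcd, hsd]

theorem pvA_other {cs : List Char} {i : Nat} (args : List String) (buf : List Char) (cd sd : Nat)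
    (hi : i < cs.length)
    (hno : ∀ o, (o = '{' ∨ o = '}' ∨ o = '[' ∨ o = ']') →
        ¬(cs[i] = o ∧ i + 1 < cs.length ∧ cs[i+1]? = some o))
    (hp : ¬(cs[i] = '|' ∧ cd = 0 ∧ sd = 0)) :
    pvLoopA cs i args buf cd sd = pvLoopA cs (i+1) args (buf ++ [cs[i]]) cd sd := by
  have key : ∀ o, (o = '{' ∨ o = '}' ∨ o = '[' ∨ o = ']') →
      ¬(cs[i] = o ∧ (if h : i + 1 < cs.length then some cs[i+1] else none) = some o) := by
    intro o ho
    rintro ⟨h1, h2⟩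
    by_cases hl : i + 1 < cs.length
    · rw [dif_pos hl] at h2
      exact hno o ho ⟨h1, hl, by rw [List.getElem?_eq_getElem hl]; exact h2⟩
    · rw [dif_neg hl] at h2; simp at h2
  rw [pvLoopA]
  simp only [hi, dite_true,
    if_neg (key '{' (by simp)), if_neg (key '}' (by simp)),
    if_neg (key '[' (by simp)), if_neg (key ']' (by simp)), if_neg hp]

-- one-step equations for port B's scan
theorem pvB_oc {cs : List Char} {i : Nat} (cd sd : Nat)
    (hi : i < cs.length) (h2 : i + 1 < cs.length) (hc : cs[i] = '{') (hn : cs[i+1] = '{') :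
    pvScanB cs i cd sd = pvScanB cs (i+2) (cd+1) sd := by
  rw [pvScanB]; simp [hi, h2, hc, hn]

theorem pvB_cc {cs : List Char} {i : Nat} (cd sd : Nat)
    (hi : i < cs.length) (h2 : i + 1 < cs.length) (hc : cs[i] = '}') (hn : cs[i+1] = '}') :
    pvScanB cs i cd sd = pvScanB cs (i+2) (cd-1) sd := by
  rw [pvScanB]; simp [hi, h2, hc, hn]

theorem pvB_os {cs : List Char} {i : Nat} (cd sd : Nat)
    (hi : i < cs.length) (h2 : i + 1 < cs.length) (hc : cs[i] = '[') (hn : cs[i+1] = '[') :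
    pvScanB cs i cd sd = pvScanB cs (i+2) cd (sd+1) := by
  rw [pvScanB]; simp [hi, h2, hc, hn]

theorem pvB_cs {cs : List Char} {i : Nat} (cd sd : Nat)
    (hi : i < cs.length) (h2 : i + 1 < cs.length) (hc : cs[i] = ']') (hn : cs[i+1] = ']') :
    pvScanB cs i cd sd = pvScanB cs (i+2) cd (sd-1) := by
  rw [pvScanB]; simp [hi, h2, hc, hn]

theorem pvB_pipe {cs : List Char} {i : Nat} (cd sd : Nat)
    (hi : i < cs.length) (hc : cs[i] = '|') (hcd : cd = 0) (hsd : sd = 0) :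
    pvScanB cs i cd sd = i :: pvScanB cs (i+1) cd sd := by
  rw [pvScanB]; simp [hi, hc, hcd, hsd]

theorem pvB_other {cs : List Char} {i : Nat} (cd sd : Nat)
    (hi : i < cs.length)
    (hno : ∀ o, (o = '{' ∨ o = '}' ∨ o = '[' ∨ o = ']') →
        ¬(cs[i] = o ∧ i + 1 < cs.length ∧ cs[i+1]? = some o))
    (hp : ¬(cs[i] = '|' ∧ cd = 0 ∧ sd = 0)) :
    pvScanB cs i cd sd = pvScanB cs (i+1) cd sd := by
  have n1 : ¬((cs[i] = '{' ∨ cs[i] = '[') ∧ (i + 1 < cs.length ∧ cs[i+1]? = some cs[i])) := by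
    rintro ⟨h1 | h1, hl, h3⟩
    · exact hno '{' (by simp) ⟨h1, hl, h1 ▸ h3⟩
    · exact hno '[' (by simp) ⟨h1, hl, h1 ▸ h3⟩
  have n2 : ¬((cs[i] = '}' ∨ cs[i] = ']') ∧ (i + 1 < cs.length ∧ cs[i+1]? = some cs[i])) := by
    rintro ⟨h1 | h1, hl, h3⟩
    · exact hno '}' (by simp) ⟨h1, hl, h1 ▸ h3⟩
    · exact hno ']' (by simp) ⟨h1, hl, h1 ▸ h3⟩
  rw [pvScanB]
  simp only [hi, dite_true, if_neg n1, if_neg n2, if_neg hp]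

-- hno builder: cs[i] = z, and (if z is a bracket) no doubled z at i
theorem pvNoDouble {cs : List Char} {i : Nat} {z : Char} (hilen : i < cs.length)
    (hc : cs[i] = z) (hz : ∀ h : i + 1 < cs.length, cs[i+1] ≠ z) :
    ∀ o, (o = '{' ∨ o = '}' ∨ o = '[' ∨ o = ']') →
      ¬(cs[i] = o ∧ i + 1 < cs.length ∧ cs[i+1]? = some o) := by
  intro o _
  rintro ⟨h1, hl, h3⟩
  rw [List.getElem?_eq_getElem hl] at h3
  have h4 : cs[i+1] = o := Option.some.inj h3
  have h5 : o = z := by rw [← h1, hc]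
  exact hz hl (h5 ▸ h4)

theorem pvNoSpecial {cs : List Char} {i : Nat} (hilen : i < cs.length)
    (h1 : cs[i] ≠ '{') (h2 : cs[i] ≠ '}')
    (h3 : cs[i] ≠ '[') (h4 : cs[i] ≠ ']') :
    ∀ o, (o = '{' ∨ o = '}' ∨ o = '[' ∨ o = ']') →
      ¬(cs[i] = o ∧ i + 1 < cs.length ∧ cs[i+1]? = some o) := by
  rintro o (rfl | rfl | rfl | rfl) ⟨hc, -, -⟩
  · exact h1 hc
  · exact h2 hc
  · exact h3 hc
  · exact h4 hc

theorem pvLoop_eq (cs : List Char) : ∀ (k i start : Nat) (args : List String) (cd sd : Nat),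
    cs.length - i ≤ k → start ≤ i →
    pvLoopA cs i args (pvSeg cs start i) cd sd = args ++ pvPartsB cs start (pvScanB cs i cd sd) := by
  intro k
  induction k with
  | zero =>
    intro i start args cd sd hk hs
    have hi : ¬ i < cs.length := by omega
    rw [pvLoopA, pvScanB]
    simp only [hi, dite_false, pvPartsB]
    rw [pvSeg_ge cs start i (by omega)]
    by_cases h : start < cs.length
    · have hne : cs.drop start ≠ [] := by simp; omega
      simp [h, hne]
    · have hn : cs.drop start = [] := by simp; omega
      simp [h, hn]
  | succ k ih =>
    intro i start args cd sd hk hs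
    by_cases hi : i < cs.length
    · by_cases hc1 : cs[i] = '{'
      · by_cases hd : i + 1 < cs.length ∧ cs[i+1]? = some '{'
        · have hn : cs[i+1]'(hd.1) = '{' := by
            have hoo := hd.2; rw [List.getElem?_eq_getElem hd.1] at hoo; exact Option.some.inj hoo
          have hseg : pvSeg cs start (i+2) = pvSeg cs start i ++ ['{', '{'] := by
            rw [pvSeg_snoc cs start (i+1) (by omega) hd.1, pvSeg_snoc cs start i hs hi, hc1, hn]
            simp
          rw [pvA_oc args _ cd sd hi hd.1 hc1 hn, pvB_oc cd sd hi hd.1 hc1 hn, ← hseg]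
          exact ih (i+2) start args (cd+1) sd (by omega) (by omega)
        · have hno := pvNoDouble hi hc1 (fun h heq => hd ⟨h, by rw [List.getElem?_eq_getElem h, heq]⟩)
          have hp : ¬(cs[i] = '|' ∧ cd = 0 ∧ sd = 0) := by
            rintro ⟨h, -⟩; rw [hc1] at h; exact absurd h (by decide)
          rw [pvA_other args _ cd sd hi hno hp, pvB_other cd sd hi hno hp,
            ← pvSeg_snoc cs start i hs hi]
          exact ih (i+1) start args cd sd (by omega) (by omega)
      · by_cases hc2 : cs[i] = '}'
        · by_cases hd : i + 1 < cs.length ∧ cs[i+1]? = some '}'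
          · have hn : cs[i+1]'(hd.1) = '}' := by
              have hoo := hd.2; rw [List.getElem?_eq_getElem hd.1] at hoo; exact Option.some.inj hoo
            have hseg : pvSeg cs start (i+2) = pvSeg cs start i ++ ['}', '}'] := by
              rw [pvSeg_snoc cs start (i+1) (by omega) hd.1, pvSeg_snoc cs start i hs hi, hc2, hn]
              simp
            rw [pvA_cc args _ cd sd hi hd.1 hc2 hn, pvB_cc cd sd hi hd.1 hc2 hn, ← hseg]
            exact ih (i+2) start args (cd-1) sd (by omega) (by omega)
          · have hno := pvNoDouble hi hc2 (fun h heq => hd ⟨h, by rw [List.getElem?_eq_getElem h, heq]⟩)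
            have hp : ¬(cs[i] = '|' ∧ cd = 0 ∧ sd = 0) := by
              rintro ⟨h, -⟩; rw [hc2] at h; exact absurd h (by decide)
            rw [pvA_other args _ cd sd hi hno hp, pvB_other cd sd hi hno hp,
              ← pvSeg_snoc cs start i hs hi]
            exact ih (i+1) start args cd sd (by omega) (by omega)
        · by_cases hc3 : cs[i] = '['
          · by_cases hd : i + 1 < cs.length ∧ cs[i+1]? = some '['
            · have hn : cs[i+1]'(hd.1) = '[' := by
                have hoo := hd.2; rw [List.getElem?_eq_getElem hd.1] at hoo; exact Option.some.inj hoo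
              have hseg : pvSeg cs start (i+2) = pvSeg cs start i ++ ['[', '['] := by
                rw [pvSeg_snoc cs start (i+1) (by omega) hd.1, pvSeg_snoc cs start i hs hi, hc3, hn]
                simp
              rw [pvA_os args _ cd sd hi hd.1 hc3 hn, pvB_os cd sd hi hd.1 hc3 hn, ← hseg]
              exact ih (i+2) start args cd (sd+1) (by omega) (by omega)
            · have hno := pvNoDouble hi hc3 (fun h heq => hd ⟨h, by rw [List.getElem?_eq_getElem h, heq]⟩)
              have hp : ¬(cs[i] = '|' ∧ cd = 0 ∧ sd = 0) := by
                rintro ⟨h, -⟩; rw [hc3] at h; exact absurd h (by decide)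
              rw [pvA_other args _ cd sd hi hno hp, pvB_other cd sd hi hno hp,
                ← pvSeg_snoc cs start i hs hi]
              exact ih (i+1) start args cd sd (by omega) (by omega)
          · by_cases hc4 : cs[i] = ']'
            · by_cases hd : i + 1 < cs.length ∧ cs[i+1]? = some ']'
              · have hn : cs[i+1]'(hd.1) = ']' := by
                  have hoo := hd.2; rw [List.getElem?_eq_getElem hd.1] at hoo; exact Option.some.inj hoo
                have hseg : pvSeg cs start (i+2) = pvSeg cs start i ++ [']', ']'] := by
                  rw [pvSeg_snoc cs start (i+1) (by omega) hd.1, pvSeg_snoc cs start i hs hi, hc4, hn]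
                  simp
                rw [pvA_cs args _ cd sd hi hd.1 hc4 hn, pvB_cs cd sd hi hd.1 hc4 hn, ← hseg]
                exact ih (i+2) start args cd (sd-1) (by omega) (by omega)
              · have hno := pvNoDouble hi hc4 (fun h heq => hd ⟨h, by rw [List.getElem?_eq_getElem h, heq]⟩)
                have hp : ¬(cs[i] = '|' ∧ cd = 0 ∧ sd = 0) := by
                  rintro ⟨h, -⟩; rw [hc4] at h; exact absurd h (by decide)
                rw [pvA_other args _ cd sd hi hno hp, pvB_other cd sd hi hno hp,
                  ← pvSeg_snoc cs start i hs hi]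
                exact ih (i+1) start args cd sd (by omega) (by omega)
            · have hno := pvNoSpecial hi hc1 hc2 hc3 hc4
              by_cases hc5 : cs[i] = '|' ∧ cd = 0 ∧ sd = 0
              · rw [pvA_pipe args _ cd sd hi hc5.1 hc5.2.1 hc5.2.2,
                  pvB_pipe cd sd hi hc5.1 hc5.2.1 hc5.2.2]
                rw [show ([] : List Char) = pvSeg cs (i+1) (i+1) from (pvSeg_self cs (i+1)).symm]
                rw [ih (i+1) (i+1) _ cd sd (by omega) (by omega)]
                simp [pvPartsB, pvSeg]
              · rw [pvA_other args _ cd sd hi hno hc5, pvB_other cd sd hi hno hc5,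
                  ← pvSeg_snoc cs start i hs hi]
                exact ih (i+1) start args cd sd (by omega) (by omega)
    · have hni : ¬ i < cs.length := hi
      rw [pvLoopA, pvScanB]
      simp only [hni, dite_false, pvPartsB]
      rw [pvSeg_ge cs start i (by omega)]
      by_cases h : start < cs.length
      · have hne : cs.drop start ≠ [] := by simp; omega
        simp [h, hne]
      · have hn : cs.drop start = [] := by simp; omega
        simp [h, hn]

-- ===== VERDICT (by name: the statement is the Claim_ definition above) =====
theorem split_template_args_spec : Claim_equal_split_template_args := by
  intro text _
  unfold Spec_split_template_args split_template_args split_template_args_alt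
  have h := pvLoop_eq text.toList text.toList.length 0 0 [] 0 0 (by omega) (by omega)
  simpa [pvSeg_self] using h
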